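-- pv_equiv track=rewrite | github.com/pypi-data/pypi-mirror-385 | packages/bengal/bengal-0.1.3.tar.gz/bengal-0.1.3/bengal/autodoc/docstring_parser.py | _parse_parameters_section
-- ===== SOURCE A (Python) =====
-- def _parse_parameters_section(section: str) -> dict[str, str]:
--     """
--     Parse Parameters section.
--
--     Format:
--         name : type
--             description
--     """
--     params = {}
--     if not section:
--         return params
--
--     lines = section.split("\n")
--     current_param = None
--     current_desc = []
--
--     for line in lines:
--         # Check for parameter definition: "name : type"
--         if ":" in line and not line.startswith(" "):
--             # Save previous param
--             if current_param:
--                 params[current_param] = " ".join(current_desc).strip()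
--
--             # Parse new param
--             parts = line.split(":", 1)
--             current_param = parts[0].strip()
--             current_desc = []
--         elif current_param and line.strip():
--             # Description line (indented)
--             current_desc.append(line.strip())
--
--     # Save last param
--     if current_param:
--         params[current_param] = " ".join(current_desc).strip()
--
--     return params
-- ===== SOURCE B (Python) =====
-- def _parse_parameters_section(section: str) -> dict[str, str]:
--     """Two-phase rewrite: split lines into (header, body) segments, then build the dict."""
--     def is_header(l):
--         return ":" in l and not l.startswith(" ")
--
--     lines = section.split("\n")
--     params = {}
--     i = 0
--     # skip leading non-header lines
--     while i < len(lines) and not is_header(lines[i]):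
--         i += 1
--     # one (header, body) segment at a time
--     while i < len(lines):
--         j = i + 1
--         while j < len(lines) and not is_header(lines[j]):
--             j += 1
--         name = lines[i].split(":", 1)[0].strip()
--         if name:
--             pieces = [l.strip() for l in lines[i + 1 : j] if l.strip()]
--             params[name] = " ".join(pieces).strip()
--         i = j
--     return params
-- ===== Notes on version B (the rewrite author's own statement) =====
-- stated objective: alternative
-- what changed: A's single stateful pass (current-param/current-desc accumulator mutated line by line) is replaced by a two-phase decomposition: first split the lines into (header, body) segments at the header lines, then build one dict entry per segment from its header name and its stripped body lines.
import Mathlib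
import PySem

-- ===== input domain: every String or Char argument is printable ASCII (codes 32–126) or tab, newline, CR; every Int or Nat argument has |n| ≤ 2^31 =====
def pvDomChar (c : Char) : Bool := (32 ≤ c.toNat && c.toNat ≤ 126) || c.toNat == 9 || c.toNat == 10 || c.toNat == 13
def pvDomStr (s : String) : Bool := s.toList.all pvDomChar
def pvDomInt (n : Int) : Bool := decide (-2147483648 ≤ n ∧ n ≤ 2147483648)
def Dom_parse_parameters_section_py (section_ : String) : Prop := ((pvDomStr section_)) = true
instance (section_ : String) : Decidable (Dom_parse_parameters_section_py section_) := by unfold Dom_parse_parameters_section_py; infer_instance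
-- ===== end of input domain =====

-- B re-implements A's single stateful pass as a two-phase segment decomposition
-- (find header lines, then build each entry from its segment); objective: alternative decomposition, same cost.


-- shared one-line transliterations of expressions both Pythons contain verbatim
-- ":" in line and not line.startswith(" ")
def pvIsHeader (l : String) : Bool := PySem.Str.isIn ":" l && !(PySem.Str.startswith l " ")
-- line.split(":", 1)[0].strip()
def pvName (l : String) : String :=
  PySem.Str.strip (((PySem.Str.splitMax? l ":" 1).getD []).headD "")
-- if current_param: params[current_param] = " ".join(desc).strip()
def pvSave (d : PySem.Dict String String) (n : String) (ds : List String) : PySem.Dict String String :=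
  if n = "" then d else d.insert n (PySem.Str.strip (PySem.Str.join " " ds))

-- ===== PORT A =====
def pvLoopA : List String → PySem.Dict String String → Option String → List String → PySem.Dict String String
  | [], params, cur, desc =>
    (match cur with
     | none => params
     | some p => pvSave params p desc)
  | l :: rest, params, cur, desc =>
    if pvIsHeader l then
      let params' := (match cur with
        | none => params
        | some p => pvSave params p desc)
      pvLoopA rest params' (some (pvName l)) []
    else
      (match cur with
       | none => pvLoopA rest params cur desc
       | some p =>
         if p = "" then pvLoopA rest params cur desc
         else if PySem.Str.strip l = "" then pvLoopA rest params cur desc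
         else pvLoopA rest params cur (desc ++ [PySem.Str.strip l]))

def parse_parameters_section_py (section_ : String) : List (String × String) :=
  if section_ = "" then []
  else (pvLoopA ((PySem.Str.split? section_ "\n").getD []) PySem.Dict.empty none []).items

-- ===== PORT B =====
-- [l.strip() for l in body if l.strip()]
def pvCollect (body : List String) : List String :=
  body.filterMap (fun l => if PySem.Str.strip l = "" then none else some (PySem.Str.strip l))

-- phase one: (header, body) segments; leading non-header lines are skipped
def pvSegs : List String → List (String × List String)
  | [] => []
  | l :: rest =>
    if pvIsHeader l then
      (l, rest.takeWhile (fun x => !pvIsHeader x)) :: pvSegs (rest.dropWhile (fun x => !pvIsHeader x))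
    else pvSegs rest
termination_by xs => xs.length
decreasing_by
  · simpa using Nat.lt_succ_of_le (List.length_dropWhile_le _ rest)
  · simp

-- phase two: one dict assignment per segment
def pvStep (d : PySem.Dict String String) (seg : String × List String) : PySem.Dict String String :=
  pvSave d (pvName seg.1) (pvCollect seg.2)

def parse_parameters_section_py_alt (section_ : String) : List (String × String) :=
  ((pvSegs ((PySem.Str.split? section_ "\n").getD [])).foldl pvStep PySem.Dict.empty).items

-- ===== PRECONDITION & SPEC =====
def Spec_parse_parameters_section_py (section_ : String) (out : List (String × String)) : Prop := out = parse_parameters_section_py_alt section_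
instance (section_ : String) (out : List (String × String)) : Decidable (Spec_parse_parameters_section_py section_ out) := by unfold Spec_parse_parameters_section_py; infer_instance

-- ===== CLAIM (what is proved, stated in full; the proofs are below) =====
def Claim_equal_parse_parameters_section_py : Prop := ∀ (section_ : String), Dom_parse_parameters_section_py section_ → Spec_parse_parameters_section_py section_ (parse_parameters_section_py section_)

-- ===== LEMMAS AND PROOFS =====

-- with a falsy current param, non-header lines are skipped by A's loop
lemma pvSkip (body : List String) (hb : ∀ x ∈ body, pvIsHeader x = false) :
    ∀ rest params desc, pvLoopA (body ++ rest) params (some "") desc = pvLoopA rest params (some "") desc := by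
  induction body with
  | nil => intro rest params desc; rfl
  | cons l b ih =>
    intro rest params desc
    have hl : pvIsHeader l = false := hb l (List.mem_cons_self ..)
    simp only [List.cons_append, pvLoopA, hl, Bool.false_eq_true, if_false]
    exact ih (fun x hx => hb x (List.mem_cons_of_mem _ hx)) rest params desc

-- with a truthy current param, A's loop accumulates exactly the stripped non-empty lines
lemma pvAcc (body : List String) (hb : ∀ x ∈ body, pvIsHeader x = false) :
    ∀ rest params p desc, p ≠ "" →
      pvLoopA (body ++ rest) params (some p) desc = pvLoopA rest params (some p) (desc ++ pvCollect body) := by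
  induction body with
  | nil => intro rest params p desc _; simp [pvCollect]
  | cons l b ih =>
    intro rest params p desc hp
    have hl : pvIsHeader l = false := hb l (List.mem_cons_self ..)
    have ih' := ih (fun x hx => hb x (List.mem_cons_of_mem _ hx)) rest params p
    by_cases hs : PySem.Str.strip l = ""
    · simp only [List.cons_append, pvLoopA, hl, Bool.false_eq_true, if_false, if_neg hp, if_pos hs]
      simpa [pvCollect, hs] using ih' desc hp
    · simp only [List.cons_append, pvLoopA, hl, Bool.false_eq_true, if_false, if_neg hp, if_neg hs]
      have := ih' (desc ++ [PySem.Str.strip l]) hp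
      simpa [pvCollect, hs, List.append_assoc] using this

lemma pvDropHead (lines : List String) :
    ∀ l ∈ (lines.dropWhile (fun x => !pvIsHeader x)).head?, pvIsHeader l = true := by
  intro l hl
  have := List.head?_dropWhile_not (p := fun x => !pvIsHeader x) lines
  cases h : (lines.dropWhile (fun x => !pvIsHeader x)).head? with
  | none => simp [h] at hl
  | some a =>
    simp [h] at hl this
    subst hl; simpa using this

set_option maxHeartbeats 1000000 in
-- main invariant: from a segment boundary (or a falsy param), A's loop equals B's segment fold
lemma pvG : ∀ (n : Nat) (lines : List String), lines.length ≤ n → ∀ params p desc,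
    (p = "" ∨ ∀ l ∈ lines.head?, pvIsHeader l = true) →
    pvLoopA lines params (some p) desc = (pvSegs lines).foldl pvStep (pvSave params p desc) := by
  intro n
  induction n with
  | zero =>
    intro lines hlen params p desc _
    have : lines = [] := List.eq_nil_of_length_eq_zero (Nat.le_zero.mp hlen)
    subst this; simp [pvLoopA, pvSegs]
  | succ n ih =>
    intro lines hlen params p desc hbd
    cases lines with
    | nil => simp [pvLoopA, pvSegs]
    | cons l rest =>
      by_cases hl : pvIsHeader l = true
      · -- header line: close the current segment, open a new one
        obtain ⟨body, rest2, hbody, hrest2⟩ :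
            ∃ b r2, b = rest.takeWhile (fun x => !pvIsHeader x) ∧ r2 = rest.dropWhile (fun x => !pvIsHeader x) :=
          ⟨_, _, rfl, rfl⟩
        have hsplit : rest = body ++ rest2 := by
          rw [hbody, hrest2]; exact (List.takeWhile_append_dropWhile).symm
        have hb : ∀ x ∈ body, pvIsHeader x = false := by
          intro x hx
          rw [hbody] at hx
          simpa using List.mem_takeWhile_imp hx
        have hlen2 : rest2.length ≤ n := by
          have h1 : rest2.length ≤ rest.length := by
            rw [hrest2]; exact List.length_dropWhile_le _ rest
          have h2 : rest.length ≤ n := by simpa using Nat.le_of_succ_le_succ hlen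
          exact le_trans h1 h2
        have hbd2 : ∀ x ∈ rest2.head?, pvIsHeader x = true := by
          rw [hrest2]; exact pvDropHead rest
        have hsegs : pvSegs (l :: rest) = (l, body) :: pvSegs rest2 := by
          rw [pvSegs]; simp [hl, ← hbody, ← hrest2]
        have hA : pvLoopA (l :: rest) params (some p) desc
            = pvLoopA rest (pvSave params p desc) (some (pvName l)) [] := by
          simp [pvLoopA, hl]
        rw [hA, hsegs, List.foldl_cons, hsplit]
        by_cases hn : pvName l = ""
        · rw [hn, pvSkip body hb]
          rw [ih rest2 hlen2 (pvSave params p desc) "" [] (Or.inl rfl)]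
          simp [pvStep, pvSave, hn]
        · rw [pvAcc body hb rest2 (pvSave params p desc) (pvName l) [] hn]
          rw [ih rest2 hlen2 (pvSave params p desc) (pvName l) ([] ++ pvCollect body) (Or.inr hbd2)]
          simp only [pvStep, List.nil_append]
      · -- non-header line with falsy param: both sides skip it
        have hp : p = "" := by
          rcases hbd with h | h
          · exact h
          · exact absurd (h l rfl) hl
        subst hp
        have hlb : pvIsHeader l = false := by simpa using hl
        have hlen2 : rest.length ≤ n := by simpa using Nat.le_of_succ_le_succ hlen
        simp only [pvLoopA, hlb, Bool.false_eq_true, if_false]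
        rw [show pvSegs (l :: rest) = pvSegs rest by rw [pvSegs]; simp [hlb]]
        exact ih rest hlen2 params "" desc (Or.inl rfl)

-- A's initial None behaves exactly like the falsy param ""
lemma pvNone : ∀ (lines : List String) params desc,
    pvLoopA lines params none desc = pvLoopA lines params (some "") desc := by
  intro lines
  induction lines with
  | nil => intro params desc; simp [pvLoopA, pvSave]
  | cons l rest ih =>
    intro params desc
    by_cases hl : pvIsHeader l = true
    · simp [pvLoopA, hl, pvSave]
    · simp only [pvLoopA, hl, Bool.false_eq_true, if_false]
      exact ih params desc

-- ===== VERDICT (by name: the statement is the Claim_ definition above) =====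
theorem parse_parameters_section_py_spec : Claim_equal_parse_parameters_section_py := by
  intro section_ _
  unfold Spec_parse_parameters_section_py
  unfold parse_parameters_section_py parse_parameters_section_py_alt
  by_cases hs : section_ = ""
  · subst hs
    rw [if_pos rfl]
    have h1 : (PySem.Str.split? "" "\n").getD [] = [""] := by decide
    have e0 : pvSegs [] = [] := by rw [pvSegs]
    have e1 : pvSegs [""] = [] := by
      rw [pvSegs]; simp [show pvIsHeader "" = false from by decide, e0]
    rw [h1, e1]
    rfl
  · rw [if_neg hs]
    congr 1
    rw [pvNone, pvG ((PySem.Str.split? section_ "\n").getD []).length _ le_rfl PySem.Dict.empty "" [] (Or.inl rfl)]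
    simp [pvSave]
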